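-- pv_equiv track=rewrite | github.com/nlitsme/transpose | transpose.py | transform
-- ===== SOURCE A (Python) =====
-- def transform(m, b, n):
--     """
--     Given vector 'b', Calculate vector 'a' such that:
--              2*a-n*one == M * (2*b-n*one),   where 'one' = (1, 1)
--         --> a = M*b + (I-M)*one*n/2
--
--     M is the transformation matrix,
--     the coordinates of 'a' and 'b' range from 0 to n-1.
--     """
--     bb = []
--     for j in range(len(b)):
--         bb.append(2*b[j]-n)
--
--     a = []
--     for i in range(len(m)):
--         x = 0
--         for j in range(len(b)):
--             x += m[i][j]*(2*b[j]-n)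
--         a.append(x)
--     aa = []
--     for j in range(len(a)):
--         aa.append((a[j]+n)//2)
--
--     return tuple(aa)
-- ===== SOURCE B (Python) =====
-- def transform(m, b, n):
--     out = []
--     for row in m:
--         s = 0
--         t = 0
--         for mij, bj in zip(row, b):
--             s += mij * bj
--             t += mij
--         out.append(s + (n - n * t) // 2)
--     return tuple(out)
-- ===== Notes on version B (the rewrite author's own statement) =====
-- stated objective: simpler
-- what changed: Per row, accumulate the two sums s = sum(m[i][j]*b[j]) and t = sum(m[i][j]) in one zip pass and return s + (n - n*t)//2, realising the docstring's closed form a = M*b + (I-M)*one*n/2 directly, instead of A's three index-driven passes over a scaled vector followed by (x+n)//2.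
import Mathlib
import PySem

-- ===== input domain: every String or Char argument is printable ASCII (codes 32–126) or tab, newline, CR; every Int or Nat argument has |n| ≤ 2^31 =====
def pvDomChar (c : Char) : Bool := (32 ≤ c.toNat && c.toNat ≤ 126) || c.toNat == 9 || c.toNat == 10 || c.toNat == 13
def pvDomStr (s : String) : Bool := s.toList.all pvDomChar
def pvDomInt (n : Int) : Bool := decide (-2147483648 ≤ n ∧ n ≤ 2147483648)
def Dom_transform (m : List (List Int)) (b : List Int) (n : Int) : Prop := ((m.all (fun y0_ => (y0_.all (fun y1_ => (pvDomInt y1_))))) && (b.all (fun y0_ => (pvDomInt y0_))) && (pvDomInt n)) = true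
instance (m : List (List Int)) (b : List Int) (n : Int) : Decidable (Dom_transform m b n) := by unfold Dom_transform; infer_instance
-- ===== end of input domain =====

-- B computes, per row, the two sums s = Σ m[i][j]*b[j] and t = Σ m[i][j] in one zip pass and
-- returns s + (n - n*t)//2 (the docstring's closed form), instead of A's three index loops; objective: simpler.

-- ===== PORT A =====
def transform (m : List (List Int)) (b : List Int) (n : Int) : List Int :=
  let _bb := (PySem.List.pyRange 0 b.length 1).foldl
    (fun acc j => acc ++ [2 * PySem.List.pyGetD b j 0 - n]) []
  let a := (PySem.List.pyRange 0 m.length 1).foldl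
    (fun acc i =>
      let x := (PySem.List.pyRange 0 b.length 1).foldl
        (fun x j => x + PySem.List.pyGetD (PySem.List.pyGetD m i []) j 0
                        * (2 * PySem.List.pyGetD b j 0 - n)) 0
      acc ++ [x]) []
  let aa := (PySem.List.pyRange 0 a.length 1).foldl
    (fun acc j => acc ++ [PySem.Int.floordiv (PySem.List.pyGetD a j 0 + n) 2]) []
  aa

-- ===== PORT B =====
def transform_alt (m : List (List Int)) (b : List Int) (n : Int) : List Int :=
  m.foldl (fun out row =>
    let st := (row.zip b).foldl (fun (st : Int × Int) p => (st.1 + p.1 * p.2, st.2 + p.1)) (0, 0)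
    out ++ [st.1 + PySem.Int.floordiv (n - n * st.2) 2]) []

-- ===== PRECONDITION & SPEC =====
-- Pre_ excludes exactly the inputs where A raises IndexError: a row of m shorter than b.
def Pre_transform (m : List (List Int)) (b : List Int) (n : Int) : Prop :=
  ∀ row ∈ m, b.length ≤ row.length
instance (m : List (List Int)) (b : List Int) (n : Int) : Decidable (Pre_transform m b n) := by unfold Pre_transform; infer_instance

def pvWitness_transform : List (List Int) × List Int × Int := ([[1, 0], [0, 1]], [3, 4], 10)

def Spec_transform (m : List (List Int)) (b : List Int) (n : Int) (out : List Int) : Prop := out = transform_alt m b n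
instance (m : List (List Int)) (b : List Int) (n : Int) (out : List Int) : Decidable (Spec_transform m b n out) := by unfold Spec_transform; infer_instance

-- ===== CLAIM (what is proved, stated in full; the proofs are below) =====
def Claim_equal_transform : Prop := ∀ (m : List (List Int)) (b : List Int) (n : Int), Dom_transform m b n → Pre_transform m b n → Spec_transform m b n (transform m b n)

-- ===== LEMMAS AND PROOFS =====

-- indexing both lists over range(len(b)) is a pass over zip, when b is not longer than row
lemma map_pyRange_zip (row b : List Int) (f : Int → Int → Int) (h : b.length ≤ row.length) :
    (PySem.List.pyRange 0 (b.length : Int) 1).map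
      (fun j => f (PySem.List.pyGetD row j 0) (PySem.List.pyGetD b j 0))
    = (row.zip b).map (fun p => f p.1 p.2) := by
  apply List.ext_getElem
  · simp [PySem.List.length_pyRange_one, Nat.min_eq_right h]
  · intro k hk1 hk2
    have hkb : k < b.length := by simpa [PySem.List.length_pyRange_one] using hk1
    have hkr : k < row.length := lt_of_lt_of_le hkb h
    simp [PySem.List.getElem_pyRange_one, List.getElem_zip,
      PySem.List.pyGetD_natCast, List.getD_eq_getElem?_getD, hkb, hkr]

-- indexing one list over range(len(xs)) with a post-map is a map over the list itself
lemma map_g_pyGetD {a b : Type} (xs : List a) (L : Int) (g : a → b) (d : a)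
    (hL : L = (xs.length : Int)) :
    (PySem.List.pyRange 0 L 1).map (fun j => g (PySem.List.pyGetD xs j d))
    = xs.map g := by
  subst hL
  apply List.ext_getElem
  · simp [PySem.List.length_pyRange_one]
  · intro k hk1 hk2
    have hkx : k < xs.length := by simpa [PySem.List.length_pyRange_one] using hk1
    simp [PySem.List.getElem_pyRange_one, PySem.List.pyGetD_natCast,
      List.getD_eq_getElem?_getD, hkx]

-- the sum A accumulates over a zip equals 2*s - n*t for B's two sums
lemma sum_scale (l : List (Int × Int)) (n : Int) :
    (l.map (fun p => p.1 * (2 * p.2 - n))).sum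
      = 2 * (l.map (fun p => p.1 * p.2)).sum - n * (l.map Prod.fst).sum := by
  induction l with
  | nil => simp
  | cons p l ih => simp [ih]; ring

lemma row_eq (row b : List Int) (n : Int) (h : b.length ≤ row.length) :
    PySem.Int.floordiv
      ((PySem.List.pyRange 0 (b.length : Int) 1).foldl
        (fun x j => x + PySem.List.pyGetD row j 0 * (2 * PySem.List.pyGetD b j 0 - n)) 0 + n) 2
    = ((row.zip b).foldl (fun (st : Int × Int) p => (st.1 + p.1 * p.2, st.2 + p.1)) (0, 0)).1
      + PySem.Int.floordiv
          (n - n * ((row.zip b).foldl (fun (st : Int × Int) p => (st.1 + p.1 * p.2, st.2 + p.1)) (0, 0)).2) 2 := by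
  have hsplit := PySem.List.foldl_prod_mk (fun (s : Int) (e : Int × Int) => s + e.1 * e.2)
    (fun (s : Int) (e : Int × Int) => s + e.1) (row.zip b) 0 0
  simp only [hsplit]
  rw [PySem.List.foldl_add, PySem.List.foldl_add, PySem.List.foldl_add,
      map_pyRange_zip row b (fun r x => r * (2 * x - n)) h, sum_scale]
  simp only [zero_add]
  set s := ((row.zip b).map (fun p => p.1 * p.2)).sum
  set t := ((row.zip b).map Prod.fst).sum
  rw [PySem.Int.floordiv_eq_ediv_of_pos (by omega), PySem.Int.floordiv_eq_ediv_of_pos (by omega)]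
  omega

-- ===== VERDICT (by name: the statement is the Claim_ definition above) =====
theorem transform_spec : Claim_equal_transform := by
  intro m b n _ hpre
  show transform m b n = transform_alt m b n
  unfold transform transform_alt
  simp only [PySem.List.foldl_append_singleton_eq_map, List.nil_append]
  rw [map_g_pyGetD m ((m.length : Nat) : Int)
    (fun row => (PySem.List.pyRange 0 (b.length : Int) 1).foldl
      (fun x j => x + PySem.List.pyGetD row j 0 * (2 * PySem.List.pyGetD b j 0 - n)) 0) [] rfl]
  simp only [List.length_map]
  rw [map_g_pyGetD (m.map _) ((m.length : Nat) : Int)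
    (fun x => PySem.Int.floordiv (x + n) 2) 0 (by simp)]
  rw [List.map_map]
  exact List.map_congr_left (fun row hrow => row_eq row b n (hpre row hrow))
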